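-- pv_equiv track=rewrite | github.com/JoviZSZ/Data-Analysis-for-data-science-jobs | src/get_industries.py | extract_keyword_count
-- ===== SOURCE A (Python) =====
-- def extract_keyword_count(mylist1,mylist2,mydict):
--     '''Takes two lists of same length of strings and searches them to see if it has any of the values in mydict.
--     If it does, it increments the count of the corresponding key. Returns a list of the same length of mylist
--     with the most popular key for each item in the list'''
--     assert isinstance(mylist1,list)
--     assert isinstance(mylist2,list)
--     assert isinstance(mydict,dict)
--
--     y=[]
--     for i in range(len(mylist1)):
--         outdict={}
--         for key in mydict:
--             for j in mydict[key]:
--                 if j in mylist1[i]: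
--                     if key in outdict:
--                         outdict[key]+=1
--                     else:
--                         outdict[key]=1
--                 if j in mylist2[i]:
--                     if key in outdict:
--                         outdict[key]+=1
--                     else:
--                         outdict[key]=1
--             if key not in outdict:
--                 outdict[key]=0
--         v=list(outdict.values())
--         k=list(outdict.keys())
--         if max(v)==0:
--             y.append('other')
--         else:
--             y.append(k[v.index(max(v))])
--
--     return y
-- ===== SOURCE B (Python) =====
-- def extract_keyword_count(mylist1, mylist2, mydict):
--     # Key-major, staged computation: for each category build its whole count
--     # vector over all items in one pass, then merge it elementwise into a
--     # running best (key, count) vector; item-major dict building disappears.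
--     pairs = list(zip(mylist1, mylist2))
--     best = [('other', 0)] * len(pairs)
--     for key, pats in mydict.items():
--         cnts = [sum((p in s1) + (p in s2) for p in pats) for s1, s2 in pairs]
--         best = [bc if c <= bc[1] else (key, c) for bc, c in zip(best, cnts)]
--     return [k for k, _ in best]
-- ===== Notes on version B (the rewrite author's own statement) =====
-- stated objective: alternative
-- what changed: B inverts the loop nesting and stages the work: instead of A's item-major pass that builds a per-item count dict over all keys and re-scans its values/keys with max()/.index(), B goes key-major, computing each category's whole count vector over all (s1,s2) pairs in one comprehension and merging it elementwise into a running best (key,count) vector, so no per-item dict and no argmax scan exist at all.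
-- outside the precondition, e.g. on extract_keyword_count(['a', 'b'], ['a'], {'k': []}): A returns ['other', 'other'], B returns ['other']; on extract_keyword_count(['a'], ['b'], {}): A raises ValueError, B returns ['other']
import Mathlib
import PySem

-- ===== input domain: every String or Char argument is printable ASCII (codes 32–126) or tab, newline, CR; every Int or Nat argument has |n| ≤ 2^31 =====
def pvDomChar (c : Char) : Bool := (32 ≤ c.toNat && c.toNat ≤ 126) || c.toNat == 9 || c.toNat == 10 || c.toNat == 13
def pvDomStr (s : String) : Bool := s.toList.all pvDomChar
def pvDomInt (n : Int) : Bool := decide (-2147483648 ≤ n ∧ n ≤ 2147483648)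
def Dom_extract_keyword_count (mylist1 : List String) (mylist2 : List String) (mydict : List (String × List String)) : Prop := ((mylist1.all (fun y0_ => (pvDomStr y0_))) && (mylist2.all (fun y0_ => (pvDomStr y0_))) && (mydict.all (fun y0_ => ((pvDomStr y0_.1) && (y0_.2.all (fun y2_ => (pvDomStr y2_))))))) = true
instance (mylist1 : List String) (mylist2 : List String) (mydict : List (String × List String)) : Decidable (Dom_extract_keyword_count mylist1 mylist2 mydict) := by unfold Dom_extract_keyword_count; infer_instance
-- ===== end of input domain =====

-- B inverts the loop nesting: instead of A's item-major pass building a per-item count dict and re-scanning it with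
-- max/index, B goes key-major, building each category's whole count vector over all items and merging it elementwise
-- into a running best vector (same return value, proved below; same asymptotic cost).

-- ===== PORT A =====
-- one pattern j of the current key: the two 'if j in …' increment blocks of A's inner loop
def pvInnerA (s1 s2 key : String) (od : PySem.Dict String Int) (j : String) : PySem.Dict String Int :=
  let od := if PySem.Str.isIn j s1 then
              (if od.contains key then od.insert key (od.getD key 0 + 1) else od.insert key 1)
            else od
  if PySem.Str.isIn j s2 then
    (if od.contains key then od.insert key (od.getD key 0 + 1) else od.insert key 1)
  else od

-- body of 'for key in mydict': the pattern loop followed by 'if key not in outdict: outdict[key] = 0'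
def pvKeyLoopA (d : PySem.Dict String (List String)) (s1 s2 : String)
    (od : PySem.Dict String Int) (key : String) : PySem.Dict String Int :=
  let od := (d.getD key []).foldl (pvInnerA s1 s2 key) od
  if !od.contains key then od.insert key 0 else od

-- one iteration of 'for i in range(len(mylist1))': build outdict, then the max/index selection
def pvLabelA (d : PySem.Dict String (List String)) (s1 s2 : String) : String :=
  let outdict := d.keys.foldl (pvKeyLoopA d s1 s2) PySem.Dict.empty
  let v : List Int := outdict.values
  let k : List String := outdict.keys
  let m : Int := (PySem.List.max? v (fun x => x)).getD 0
  if m = 0 then "other"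
  else (PySem.List.pyGet? k (((PySem.List.index? v m).getD 0 : Nat) : Int)).getD ""

def extract_keyword_count (mylist1 : List String) (mylist2 : List String) (mydict : List (String × List String)) : List String :=
  let d := PySem.Dict.ofList mydict
  (PySem.List.pyRange 0 (mylist1.length : Int) 1).foldl
    (fun y i => y ++ [pvLabelA d (PySem.List.pyGetD mylist1 i "") (PySem.List.pyGetD mylist2 i "")]) []

-- ===== PORT B =====
-- cnts entry: sum((p in s1) + (p in s2) for p in pats) for one pair s = (s1, s2)
def pvCntB (pats : List String) (s : String × String) : Int :=
  (pats.map (fun p => (if PySem.Str.isIn p s.1 then (1:Int) else 0) + (if PySem.Str.isIn p s.2 then (1:Int) else 0))).sum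

def extract_keyword_count_alt (mylist1 : List String) (mylist2 : List String) (mydict : List (String × List String)) : List String :=
  let pairs := mylist1.zip mylist2
  let best0 : List (String × Int) := List.replicate pairs.length ("other", (0:Int))
  let best := (PySem.Dict.ofList mydict).items.foldl
    (fun best kp =>
      let cnts := pairs.map (pvCntB kp.2)
      (best.zip cnts).map (fun bc => if bc.2 ≤ bc.1.2 then bc.1 else (kp.1, bc.2)))
    best0
  best.map Prod.fst

-- ===== PRECONDITION & SPEC =====
-- Pre_ excludes the mismatched-length inputs (docstring: 'two lists of same length') and empty-dict inputs with a
-- nonempty mylist1: there A raises (IndexError resp. ValueError from max([])), except in the degenerate corner where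
-- mylist2 is shorter but every pattern list is empty, so mylist2 is never indexed and A's full-length all-'other'
-- result vs B's zip-truncated result are both implementation accidents of an unspecified shape.
def Pre_extract_keyword_count (mylist1 : List String) (mylist2 : List String) (mydict : List (String × List String)) : Prop :=
  (mydict ≠ [] ∧ mylist1.length ≤ mylist2.length) ∨ mylist1 = []
instance (mylist1 : List String) (mylist2 : List String) (mydict : List (String × List String)) : Decidable (Pre_extract_keyword_count mylist1 mylist2 mydict) := by unfold Pre_extract_keyword_count; infer_instance
def pvWitness_extract_keyword_count : List String × List String × (List (String × List String)) :=
  (["python and sql dev", "cook"], ["ml", "pan"], [("data", ["sql", "ml"]), ("chef", ["pan", "cook"])])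

def Spec_extract_keyword_count (mylist1 : List String) (mylist2 : List String) (mydict : List (String × List String)) (out : List String) : Prop := out = extract_keyword_count_alt mylist1 mylist2 mydict
instance (mylist1 : List String) (mylist2 : List String) (mydict : List (String × List String)) (out : List String) : Decidable (Spec_extract_keyword_count mylist1 mylist2 mydict out) := by unfold Spec_extract_keyword_count; infer_instance

-- ===== CLAIM (what is proved, stated in full; the proofs are below) =====
def Claim_equal_extract_keyword_count : Prop := ∀ (mylist1 : List String) (mylist2 : List String) (mydict : List (String × List String)), Dom_extract_keyword_count mylist1 mylist2 mydict → Pre_extract_keyword_count mylist1 mylist2 mydict → Spec_extract_keyword_count mylist1 mylist2 mydict (extract_keyword_count mylist1 mylist2 mydict)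

-- ===== LEMMAS AND PROOFS =====

-- the per-pair count, curried form used throughout the A-side analysis (definitionally pvCntB)
def pvCnt (s1 s2 : String) (pats : List String) : Int :=
  (pats.map (fun p => (if PySem.Str.isIn p s1 then (1:Int) else 0) + (if PySem.Str.isIn p s2 then (1:Int) else 0))).sum

-- the per-item running-best fold B's key-major fold is shown to compute columnwise
def pvLabelOld (items : List (String × List String)) (s1 s2 : String) : String :=
  (items.foldl (fun best kp =>
      let c := pvCnt s1 s2 kp.2
      if best.2 < c then (kp.1, c) else best) ("other", (0:Int))).1

theorem pvCnt_nonneg (s1 s2 : String) (pats : List String) : 0 ≤ pvCnt s1 s2 pats := by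
  apply List.sum_nonneg
  intro x hx
  simp only [List.mem_map] at hx
  obtain ⟨p, _, rfl⟩ := hx
  split_ifs <;> norm_num

theorem pvInner_present (s1 s2 key : String) (pats : List String) (od : PySem.Dict String Int) (v : Int)
    (h : od.get? key = some v) :
    pats.foldl (pvInnerA s1 s2 key) od =
      if pvCnt s1 s2 pats = 0 then od else od.insert key (v + pvCnt s1 s2 pats) := by
  induction pats generalizing od v with
  | nil => simp [pvCnt]
  | cons p ps ih =>
    have hc : od.contains key = true := by
      rw [PySem.Dict.contains_eq_isSome_get?, h]; rfl
    have hg : od.getD key 0 = v := PySem.Dict.getD_of_get?_eq_some od 0 h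
    have hps := pvCnt_nonneg s1 s2 ps
    have hcons : pvCnt s1 s2 (p :: ps) =
        ((if PySem.Str.isIn p s1 then (1:Int) else 0) + (if PySem.Str.isIn p s2 then (1:Int) else 0)) + pvCnt s1 s2 ps := by
      simp [pvCnt]
    by_cases h1 : PySem.Chars.isIn p.toList s1.toList = true <;> by_cases h2 : PySem.Chars.isIn p.toList s2.toList = true
    · have ha : ((if PySem.Str.isIn p s1 then (1:Int) else 0) + (if PySem.Str.isIn p s2 then (1:Int) else 0)) = 2 := by simp [h1, h2]
      have hstep : pvInnerA s1 s2 key od p = od.insert key (v + 1 + 1) := by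
        simp [pvInnerA, h1, h2, hc, hg, PySem.Dict.insert_insert_self]
      rw [List.foldl_cons, hstep, ih _ _ (PySem.Dict.get?_insert_self od key _), hcons, ha]
      rcases eq_or_lt_of_le hps with e | e
      · rw [← e, if_pos rfl, if_neg (by omega)]
        all_goals first
        | rfl
        | (congr 1; ring)
      · rw [if_neg (by omega), if_neg (by omega), PySem.Dict.insert_insert_self]
        all_goals first
        | rfl
        | (congr 1; ring)
    · have ha : ((if PySem.Str.isIn p s1 then (1:Int) else 0) + (if PySem.Str.isIn p s2 then (1:Int) else 0)) = 1 := by simp [h1, h2]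
      have hstep : pvInnerA s1 s2 key od p = od.insert key (v + 1) := by
        simp [pvInnerA, h1, h2, hc, hg, PySem.Dict.insert_insert_self]
      rw [List.foldl_cons, hstep, ih _ _ (PySem.Dict.get?_insert_self od key _), hcons, ha]
      rcases eq_or_lt_of_le hps with e | e
      · rw [← e, if_pos rfl, if_neg (by omega)]
        all_goals first
        | rfl
        | (congr 1; ring)
      · rw [if_neg (by omega), if_neg (by omega), PySem.Dict.insert_insert_self]
        all_goals first
        | rfl
        | (congr 1; ring)
    · have ha : ((if PySem.Str.isIn p s1 then (1:Int) else 0) + (if PySem.Str.isIn p s2 then (1:Int) else 0)) = 1 := by simp [h1, h2]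
      have hstep : pvInnerA s1 s2 key od p = od.insert key (v + 1) := by
        simp [pvInnerA, h1, h2, hc, hg, PySem.Dict.insert_insert_self]
      rw [List.foldl_cons, hstep, ih _ _ (PySem.Dict.get?_insert_self od key _), hcons, ha]
      rcases eq_or_lt_of_le hps with e | e
      · rw [← e, if_pos rfl, if_neg (by omega)]
        all_goals first
        | rfl
        | (congr 1; ring)
      · rw [if_neg (by omega), if_neg (by omega), PySem.Dict.insert_insert_self]
        all_goals first
        | rfl
        | (congr 1; ring)
    · have ha : ((if PySem.Str.isIn p s1 then (1:Int) else 0) + (if PySem.Str.isIn p s2 then (1:Int) else 0)) = 0 := by simp [h1, h2]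
      have hstep : pvInnerA s1 s2 key od p = od := by simp [pvInnerA, h1, h2]
      rw [List.foldl_cons, hstep, ih _ _ h, hcons, ha]
      norm_num

theorem pvInner_absent (s1 s2 key : String) (pats : List String) (od : PySem.Dict String Int)
    (h : od.contains key = false) :
    pats.foldl (pvInnerA s1 s2 key) od =
      if pvCnt s1 s2 pats = 0 then od else od.insert key (pvCnt s1 s2 pats) := by
  induction pats generalizing od with
  | nil => simp [pvCnt]
  | cons p ps ih =>
    have hps := pvCnt_nonneg s1 s2 ps
    have hcons : pvCnt s1 s2 (p :: ps) =
        ((if PySem.Str.isIn p s1 then (1:Int) else 0) + (if PySem.Str.isIn p s2 then (1:Int) else 0)) + pvCnt s1 s2 ps := by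
      simp [pvCnt]
    by_cases h1 : PySem.Chars.isIn p.toList s1.toList = true <;> by_cases h2 : PySem.Chars.isIn p.toList s2.toList = true
    · have ha : ((if PySem.Str.isIn p s1 then (1:Int) else 0) + (if PySem.Str.isIn p s2 then (1:Int) else 0)) = 2 := by simp [h1, h2]
      have hstep : pvInnerA s1 s2 key od p = od.insert key (1 + 1) := by
        simp [pvInnerA, h1, h2, h, PySem.Dict.insert_insert_self]
      rw [List.foldl_cons, hstep, pvInner_present s1 s2 key ps _ _ (PySem.Dict.get?_insert_self od key _), hcons, ha]
      rcases eq_or_lt_of_le hps with e | e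
      · rw [← e, if_pos rfl, if_neg (by omega)]
        all_goals first
        | rfl
        | (congr 1; ring)
      · rw [if_neg (by omega), if_neg (by omega), PySem.Dict.insert_insert_self]
        all_goals first
        | rfl
        | (congr 1; ring)
    · have ha : ((if PySem.Str.isIn p s1 then (1:Int) else 0) + (if PySem.Str.isIn p s2 then (1:Int) else 0)) = 1 := by simp [h1, h2]
      have hstep : pvInnerA s1 s2 key od p = od.insert key 1 := by
        simp [pvInnerA, h1, h2, h, PySem.Dict.insert_insert_self]
      rw [List.foldl_cons, hstep, pvInner_present s1 s2 key ps _ _ (PySem.Dict.get?_insert_self od key _), hcons, ha]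
      rcases eq_or_lt_of_le hps with e | e
      · rw [← e, if_pos rfl, if_neg (by omega)]
        all_goals first
        | rfl
        | (congr 1; ring)
      · rw [if_neg (by omega), if_neg (by omega), PySem.Dict.insert_insert_self]
        all_goals first
        | rfl
        | (congr 1; ring)
    · have ha : ((if PySem.Str.isIn p s1 then (1:Int) else 0) + (if PySem.Str.isIn p s2 then (1:Int) else 0)) = 1 := by simp [h1, h2]
      have hstep : pvInnerA s1 s2 key od p = od.insert key 1 := by
        simp [pvInnerA, h1, h2, h, PySem.Dict.insert_insert_self]
      rw [List.foldl_cons, hstep, pvInner_present s1 s2 key ps _ _ (PySem.Dict.get?_insert_self od key _), hcons, ha]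
      rcases eq_or_lt_of_le hps with e | e
      · rw [← e, if_pos rfl, if_neg (by omega)]
        all_goals first
        | rfl
        | (congr 1; ring)
      · rw [if_neg (by omega), if_neg (by omega), PySem.Dict.insert_insert_self]
        all_goals first
        | rfl
        | (congr 1; ring)
    · have ha : ((if PySem.Str.isIn p s1 then (1:Int) else 0) + (if PySem.Str.isIn p s2 then (1:Int) else 0)) = 0 := by simp [h1, h2]
      have hstep : pvInnerA s1 s2 key od p = od := by simp [pvInnerA, h1, h2]
      rw [List.foldl_cons, hstep, ih _ h, hcons, ha]
      norm_num

theorem pvKeyLoopA_eq (d : PySem.Dict String (List String)) (s1 s2 key : String) (od : PySem.Dict String Int)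
    (h : od.contains key = false) :
    pvKeyLoopA d s1 s2 od key = od.insert key (pvCnt s1 s2 (d.getD key [])) := by
  unfold pvKeyLoopA
  rw [pvInner_absent s1 s2 key _ od h]
  rcases eq_or_lt_of_le (pvCnt_nonneg s1 s2 (d.getD key [])) with e | e
  · rw [← e, if_pos rfl]
    simp [h]
  · have hcn : ¬ (pvCnt s1 s2 (d.getD key []) = 0) := by omega
    rw [if_neg hcn]
    simp [PySem.Dict.contains_insert_self]

theorem pvOuter_items (d : PySem.Dict String (List String)) (s1 s2 : String) :
    ∀ (ks : List String) (od : PySem.Dict String Int), ks.Nodup → (∀ k ∈ ks, od.contains k = false) →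
      (ks.foldl (pvKeyLoopA d s1 s2) od).items = od.items ++ ks.map (fun k => (k, pvCnt s1 s2 (d.getD k []))) := by
  intro ks
  induction ks with
  | nil => simp
  | cons k0 ks ih =>
    intro od hnd hf
    rw [List.foldl_cons, pvKeyLoopA_eq d s1 s2 k0 od (hf k0 (by simp))]
    rw [ih _ (by exact (List.nodup_cons.mp hnd).2) ?fresh]
    · rw [PySem.Dict.items_insert_of_not_contains od _ (hf k0 (by simp))]
      simp
    case fresh =>
      intro k hk
      rw [PySem.Dict.contains_insert]
      have hne : k ≠ k0 := by
        intro hkk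
        exact (List.nodup_cons.mp hnd).1 (hkk ▸ hk)
      simp [hne, hf k (by simp [hk])]

def pvSel (L : List (String × Int)) (b : String) (c : Int) : String × Int :=
  L.foldl (fun best kp => if best.2 < kp.2 then kp else best) (b, c)

theorem pvSel_eq (L : List (String × Int)) (b : String) (c : Int) :
    pvSel L b c =
      if (L.map Prod.snd).foldl max c ≤ c then (b, c)
      else (((L.find? (fun x => x.2 == (L.map Prod.snd).foldl max c)).getD (b, c)).1,
            (L.map Prod.snd).foldl max c) := by
  induction L generalizing b c with
  | nil => simp [pvSel]
  | cons x xs ih =>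
    have hle := (PySem.List.le_foldl_max (xs.map Prod.snd) (max c x.2)).1
    by_cases hx : c < x.2
    · -- step takes x
      have hM : (((x :: xs).map Prod.snd).foldl max c) = ((xs.map Prod.snd).foldl max x.2) := by
        simp only [List.map_cons, List.foldl_cons]
        rw [max_eq_right (le_of_lt hx)]
      have hstep : pvSel (x :: xs) b c = pvSel xs x.1 x.2 := by
        simp [pvSel, hx]
      rw [hstep, ih x.1 x.2, hM]
      have hx2le := (PySem.List.le_foldl_max (xs.map Prod.snd) x.2).1
      by_cases hM2 : ((xs.map Prod.snd).foldl max x.2) ≤ x.2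
      · -- the max is x.2 itself
        have hMeq : ((xs.map Prod.snd).foldl max x.2) = x.2 := le_antisymm hM2 hx2le
        rw [if_pos hM2, if_neg (by omega), hMeq]
        have hfind : (x :: xs).find? (fun y => y.2 == x.2) = some x := by
          simp [List.find?_cons]
        rw [hfind]
        rfl
      · rw [if_neg hM2, if_neg (by omega)]
        have hmem : ((xs.map Prod.snd).foldl max x.2) ∈ xs.map Prod.snd := by
          rcases PySem.List.foldl_max_mem (xs.map Prod.snd) x.2 with hh | hh
          · omega
          · exact hh
        have hxne : (x.2 == ((xs.map Prod.snd).foldl max x.2)) = false := by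
          simp
          omega
        rw [List.find?_cons_of_neg (by simp; omega)]
        obtain ⟨y, hy, hy2⟩ := List.mem_map.mp hmem
        have hsome : (xs.find? (fun z => z.2 == ((xs.map Prod.snd).foldl max x.2))).isSome := by
          rw [List.find?_isSome]
          exact ⟨y, hy, by simp [hy2]⟩
        obtain ⟨z, hz⟩ := Option.isSome_iff_exists.mp hsome
        rw [hz]
        rfl
    · -- step keeps (b, c)
      have hM : (((x :: xs).map Prod.snd).foldl max c) = ((xs.map Prod.snd).foldl max c) := by
        simp only [List.map_cons, List.foldl_cons]
        rw [max_eq_left (by omega : x.2 ≤ c)]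
      have hstep : pvSel (x :: xs) b c = pvSel xs b c := by
        simp [pvSel, hx]
      rw [hstep, ih b c, hM]
      by_cases hM2 : ((xs.map Prod.snd).foldl max c) ≤ c
      · rw [if_pos hM2, if_pos hM2]
      · rw [if_neg hM2, if_neg hM2]
        have hxne : (x.2 == ((xs.map Prod.snd).foldl max c)) = false := by
          simp
          omega
        rw [List.find?_cons_of_neg (by simp; omega)]

theorem pvIndex_eq_find (L : List (String × Int)) (m : Int) (hm : m ∈ L.map Prod.snd) :
    (PySem.List.pyGet? (L.map Prod.fst) (((PySem.List.index? (L.map Prod.snd) m).getD 0 : Nat) : Int)).getD ""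
      = ((L.find? (fun x => x.2 == m)).getD ("", 0)).1 := by
  induction L with
  | nil => simp at hm
  | cons x xs ih =>
    by_cases hx : x.2 = m
    · simp only [List.map_cons]
      rw [hx, PySem.List.index?_cons_self]
      simp only [Option.getD_some, Nat.cast_zero]
      rw [PySem.List.pyGet?_zero_cons]
      simp [List.find?_cons, hx]
    · have hm' : m ∈ xs.map Prod.snd := by
        rcases List.mem_cons.mp hm with hh | hh
        · exact absurd hh.symm (by simpa using hx)
        · exact hh
      simp only [List.map_cons]
      rw [PySem.List.index?_cons_of_ne _ (by simpa using hx)]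
      obtain ⟨j, hj⟩ := Option.isSome_iff_exists.mp ((PySem.List.index?_isSome_iff (xs.map Prod.snd) m).mpr hm')
      rw [hj]
      simp only [Option.map_some, Option.getD_some]
      rw [PySem.List.pyGet?_natCast, List.getElem?_cons_succ]
      rw [List.find?_cons_of_neg (by simp [hx])]
      rw [← ih hm', hj]
      simp only [Option.getD_some]
      rw [PySem.List.pyGet?_natCast]

theorem pvLabel_eq (d : PySem.Dict String (List String)) (s1 s2 : String)
    (hne : d.keys ≠ []) (hnd : d.keys.Nodup) :
    pvLabelA d s1 s2 = pvLabelOld d.items s1 s2 := by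
  have houter := pvOuter_items d s1 s2 d.keys PySem.Dict.empty hnd
    (fun k _ => PySem.Dict.contains_empty k)
  set L : List (String × Int) := d.keys.map (fun k => (k, pvCnt s1 s2 (d.getD k []))) with hL
  have hitems : (d.keys.foldl (pvKeyLoopA d s1 s2) PySem.Dict.empty).items = L := by
    simpa using houter
  have hB : pvLabelOld d.items s1 s2 = (pvSel L "other" 0).1 := by
    unfold pvLabelOld pvSel
    rw [PySem.Dict.items_eq_map_keys d hnd [], hL]
    rw [List.foldl_map, List.foldl_map]
  have hnnL : ∀ y ∈ L.map Prod.snd, (0:Int) ≤ y := by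
    intro y hy
    simp only [hL, List.map_map, List.mem_map] at hy
    obtain ⟨k, _, rfl⟩ := hy
    exact pvCnt_nonneg s1 s2 _
  obtain ⟨k0, K, hK⟩ := List.exists_cons_of_ne_nil hne
  have hvcons : L.map Prod.snd =
      pvCnt s1 s2 (d.getD k0 []) :: K.map (fun k => pvCnt s1 s2 (d.getD k [])) := by
    rw [hL, hK]
    simp
  have hm : (PySem.List.max? (L.map Prod.snd) (fun x => x)).getD 0 =
      (K.map (fun k => pvCnt s1 s2 (d.getD k []))).foldl max (pvCnt s1 s2 (d.getD k0 [])) := by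
    rw [hvcons, PySem.List.max?_id_cons]
    rfl
  have hM : (L.map Prod.snd).foldl max 0 =
      (K.map (fun k => pvCnt s1 s2 (d.getD k []))).foldl max (pvCnt s1 s2 (d.getD k0 [])) := by
    rw [hvcons, List.foldl_cons, max_eq_right (pvCnt_nonneg s1 s2 _)]
  set m : Int := (K.map (fun k => pvCnt s1 s2 (d.getD k []))).foldl max (pvCnt s1 s2 (d.getD k0 [])) with hmdef
  have hm0 : 0 ≤ m := by
    have := (PySem.List.le_foldl_max (L.map Prod.snd) 0).1
    rw [hM] at this
    exact this
  have hvdef : ∀ (od : PySem.Dict String Int), od.values = od.items.map Prod.snd := fun _ => rfl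
  have hkdef : ∀ (od : PySem.Dict String Int), od.keys = od.items.map Prod.fst := fun _ => rfl
  have hval : (d.keys.foldl (pvKeyLoopA d s1 s2) PySem.Dict.empty).values = L.map Prod.snd := by
    rw [hvdef, hitems]
  have hkeyL : (d.keys.foldl (pvKeyLoopA d s1 s2) PySem.Dict.empty).keys = L.map Prod.fst := by
    rw [hkdef, hitems]
  simp only [pvLabelA, hval, hkeyL, hm]
  rcases eq_or_lt_of_le hm0 with e | e
  · rw [if_pos (by omega), hB, pvSel_eq, hM, if_pos (by omega)]
  · rw [if_neg (by omega), hB, pvSel_eq, hM, if_neg (by omega)]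
    have hmem : m ∈ L.map Prod.snd := by
      rcases PySem.List.foldl_max_mem (L.map Prod.snd) 0 with hh | hh
      · rw [hM] at hh
        omega
      · rw [hM] at hh
        exact hh
    rw [pvIndex_eq_find L m hmem]
    obtain ⟨y, hy, hy2⟩ := List.mem_map.mp hmem
    have hsome : (L.find? (fun x => x.2 == m)).isSome := by
      rw [List.find?_isSome]
      exact ⟨y, hy, by simp [hy2]⟩
    obtain ⟨z, hz⟩ := Option.isSome_iff_exists.mp hsome
    rw [hz]
    rfl

theorem pvKeys_ofList_ne_nil (ps : List (String × List String)) (h : ps ≠ []) :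
    (PySem.Dict.ofList ps).keys ≠ [] := by
  obtain ⟨p, ps', rfl⟩ := List.exists_cons_of_ne_nil h
  have hk := PySem.Dict.keys_foldl_insert_key (ν := List String) (p::ps') Prod.fst (fun _ x => x.2) PySem.Dict.empty
  have hmem : p.1 ∈ (PySem.Dict.ofList (p::ps')).keys := by
    rw [PySem.Dict.ofList, PySem.Dict.update, hk, PySem.Set.mem_update]
    simp
  intro hnil
  rw [hnil] at hmem
  simp at hmem

-- B's key-major fold over columns equals the pairwise (per-item) running-best fold
theorem pvColFold (items : List (String × List String)) (pairs : List (String × String))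
    (g : String × String → String × Int) :
    items.foldl (fun best kp =>
        ((best.zip (pairs.map (pvCntB kp.2))).map (fun bc => if bc.2 ≤ bc.1.2 then bc.1 else (kp.1, bc.2))))
      (pairs.map g)
    = pairs.map (fun p => items.foldl
        (fun b kp => if pvCntB kp.2 p ≤ b.2 then b else (kp.1, pvCntB kp.2 p)) (g p)) := by
  induction items generalizing g with
  | nil => rfl
  | cons kp items ih =>
    rw [List.foldl_cons, List.zip_map', List.map_map, ih]
    simp [List.foldl_cons]

-- the per-item fold with B's step is pvLabelOld
theorem pvFold_eq_old (items : List (String × List String)) (p : String × String) :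
    (items.foldl (fun b kp => if pvCntB kp.2 p ≤ b.2 then b else (kp.1, pvCntB kp.2 p)) ("other", (0:Int))).1
      = pvLabelOld items p.1 p.2 := by
  unfold pvLabelOld
  congr 2
  funext b kp
  have hcc : pvCnt p.1 p.2 kp.2 = pvCntB kp.2 p := rfl
  simp only [hcc]
  by_cases h : pvCntB kp.2 p ≤ b.2
  · rw [if_pos h, if_neg (by omega)]
  · rw [if_neg h, if_pos (by omega)]

theorem pvAlt_eq (mylist1 : List String) (mylist2 : List String) (mydict : List (String × List String)) :
    extract_keyword_count_alt mylist1 mylist2 mydict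
      = (mylist1.zip mylist2).map (fun s => pvLabelOld (PySem.Dict.ofList mydict).items s.1 s.2) := by
  unfold extract_keyword_count_alt
  have hrep : List.replicate (mylist1.zip mylist2).length (("other", (0:Int)))
      = (mylist1.zip mylist2).map (fun _ => ("other", (0:Int))) := by
    induction mylist1.zip mylist2 with
    | nil => rfl
    | cons a l ih => simp only [List.length_cons, List.replicate_succ, List.map_cons, ih]
  simp only [hrep]
  rw [pvColFold, List.map_map]
  exact List.map_congr_left (fun p _ => pvFold_eq_old _ p)

theorem pvMain (mylist1 : List String) (mylist2 : List String) (mydict : List (String × List String))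
    (hpre : (mydict ≠ [] ∧ mylist1.length ≤ mylist2.length) ∨ mylist1 = []) :
    extract_keyword_count mylist1 mylist2 mydict = extract_keyword_count_alt mylist1 mylist2 mydict := by
  rw [pvAlt_eq]
  rcases hpre with ⟨hd, hlen⟩ | rfl
  · unfold extract_keyword_count
    rw [PySem.List.pyRange_zero_natCast, List.foldl_map, PySem.List.foldl_append_singleton_eq_map,
      List.nil_append]
    apply List.ext_getElem
    · simp
      omega
    · intro i h1 h2
      simp only [List.getElem_map, List.getElem_range, List.getElem_zip]
      rw [PySem.List.pyGetD_natCast, PySem.List.pyGetD_natCast]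
      rw [List.getD_eq_getElem _ _ (by simpa using h1), List.getD_eq_getElem _ _ (by simp at h1 ⊢; omega)]
      exact pvLabel_eq _ _ _ (pvKeys_ofList_ne_nil _ hd) (PySem.Dict.nodup_keys_ofList _)
  · simp [extract_keyword_count, PySem.List.pyRange_zero_natCast]

-- ===== VERDICT (by name: the statement is the Claim_ definition above) =====
theorem extract_keyword_count_spec : Claim_equal_extract_keyword_count := by
  intro mylist1 mylist2 mydict _ hpre
  unfold Spec_extract_keyword_count
  exact pvMain mylist1 mylist2 mydict hpre
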